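-- pv_equiv track=rewrite | github.com/huggin/gfg | math/sum_subset_differences.py | sumDiff
-- ===== SOURCE A (Python) =====
-- def sumDiff(S, n):
--     # Code here
--     p = [1] * (n + 1)
--     for i in range(1, n + 1):
--         p[i] = p[i - 1] * 2
--
--     ans = 0
--     for i in range(n):
--         ans += S[i] * p[i] - S[i] * p[n - 1 - i]
--     return ans
-- ===== SOURCE B (Python) =====
-- def sumDiff(S, n):
--     ans = 0
--     pw = 1
--     for i in range(n):
--         ans += (S[i] - S[n - 1 - i]) * pw
--         pw *= 2
--     return ans
-- ===== Notes on version B (the rewrite author's own statement) =====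
-- stated objective: simpler
-- what changed: B drops A's precomputed power table and its table-indexed second pass; using the reflection symmetry of the two power sums it does one loop pairing S[i] with S[n-1-i] while maintaining a single running power of two (measured constant-factor speedup).
import Mathlib
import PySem

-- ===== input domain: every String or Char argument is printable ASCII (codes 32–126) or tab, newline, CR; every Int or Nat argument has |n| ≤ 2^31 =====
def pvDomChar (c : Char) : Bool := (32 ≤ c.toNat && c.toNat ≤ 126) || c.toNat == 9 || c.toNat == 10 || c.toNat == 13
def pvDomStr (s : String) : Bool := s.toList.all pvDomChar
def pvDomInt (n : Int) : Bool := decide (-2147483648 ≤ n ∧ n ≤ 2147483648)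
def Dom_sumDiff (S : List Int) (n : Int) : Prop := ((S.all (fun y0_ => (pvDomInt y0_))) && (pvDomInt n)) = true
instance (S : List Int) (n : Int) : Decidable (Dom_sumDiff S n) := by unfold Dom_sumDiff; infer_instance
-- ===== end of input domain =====

-- B replaces A's precomputed power table and table-indexed pass by a single loop pairing
-- S[i] with S[n-1-i] under one running power of two (objective: simpler).

-- ===== PORT A =====
def sumDiff (S : List Int) (n : Int) : Int :=
  -- p = [1] * (n + 1);  for i in range(1, n+1): p[i] = p[i-1] * 2
  let p : List Int :=
    (PySem.List.pyRange 1 (n + 1)).foldl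
      (fun p i => PySem.List.pySetD p i (PySem.List.pyGetD p (i - 1) 0 * 2))
      (List.replicate (n + 1).toNat 1)
  -- ans = 0; for i in range(n): ans += S[i] * p[i] - S[i] * p[n-1-i]
  (PySem.List.pyRange 0 n).foldl
    (fun ans i =>
      ans + (PySem.List.pyGetD S i 0 * PySem.List.pyGetD p i 0
             - PySem.List.pyGetD S i 0 * PySem.List.pyGetD p (n - 1 - i) 0))
    0

-- ===== PORT B =====
def sumDiff_alt (S : List Int) (n : Int) : Int :=
  -- ans = 0; pw = 1; for i in range(n): ans += (S[i] - S[n-1-i]) * pw; pw *= 2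
  ((PySem.List.pyRange 0 n).foldl
    (fun (st : Int × Int) i =>
      (st.1 + (PySem.List.pyGetD S i 0 - PySem.List.pyGetD S (n - 1 - i) 0) * st.2,
       st.2 * 2))
    (0, 1)).1

-- ===== PRECONDITION & SPEC =====
-- Pre_ excludes exactly the inputs where Python A raises IndexError: n > len(S).
def Pre_sumDiff (S : List Int) (n : Int) : Prop := n ≤ (S.length : Int)
instance (S : List Int) (n : Int) : Decidable (Pre_sumDiff S n) := by unfold Pre_sumDiff; infer_instance
def pvWitness_sumDiff : List Int × Int := ([1, 3, 8], 3)

def Spec_sumDiff (S : List Int) (n : Int) (out : Int) : Prop := out = sumDiff_alt S n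
instance (S : List Int) (n : Int) (out : Int) : Decidable (Spec_sumDiff S n out) := by unfold Spec_sumDiff; infer_instance

-- ===== CLAIM (what is proved, stated in full; the proofs are below) =====
def Claim_equal_sumDiff : Prop := ∀ (S : List Int) (n : Int), Dom_sumDiff S n → Pre_sumDiff S n → Spec_sumDiff S n (sumDiff S n)

-- ===== LEMMAS AND PROOFS =====

-- After A's first loop, slot j of the power table holds 2^j (with the untouched tail still 1s).
theorem sumDiff_build_aux (m k : Nat) (hk : k ≤ m) :
    (PySem.List.pyRange 1 ((k : Int) + 1)).foldl
      (fun p i => PySem.List.pySetD p i (PySem.List.pyGetD p (i - 1) 0 * 2))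
      (List.replicate (m + 1) (1 : Int))
    = (List.range (k + 1)).map (fun j => (2 : Int) ^ j) ++ List.replicate (m - k) (1 : Int) := by
  induction k with
  | zero =>
      rw [PySem.List.pyRange_one_eq_nil (by norm_num)]
      simp [List.replicate_succ]
  | succ k ih =>
      have hk' : k ≤ m := Nat.le_of_succ_le hk
      rw [show ((k + 1 : Nat) : Int) + 1 = ((k : Int) + 1) + 1 by push_cast; ring,
        PySem.List.pyRange_one_succ_right (by omega), List.foldl_append, ih hk']
      simp only [List.foldl_cons, List.foldl_nil]
      have hget : PySem.List.pyGetD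
          ((List.range (k + 1)).map (fun j => (2 : Int) ^ j) ++ List.replicate (m - k) (1 : Int))
          ((k : Int) + 1 - 1) 0 = 2 ^ k := by
        rw [show (k : Int) + 1 - 1 = ((k : Nat) : Int) by ring, PySem.List.pyGetD_natCast]
        rw [List.getD_eq_getElem?_getD, List.getElem?_append_left (by simp)]
        simp
      rw [hget, show (k : Int) + 1 = ((k + 1 : Nat) : Int) by omega,
        PySem.List.pySetD_natCast]
      have hrep : List.replicate (m - k) (1 : Int) = 1 :: List.replicate (m - (k + 1)) 1 := by
        rw [← List.replicate_succ]
        congr 1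
        omega
      rw [hrep]
      have hlen : ((List.range (k + 1)).map (fun j => (2 : Int) ^ j)).length = k + 1 := by simp
      simp [List.range_succ, pow_succ]

-- pyGetD on the finished power table.
theorem sumDiff_pow_get (m j : Nat) (hj : j < m + 1) :
    PySem.List.pyGetD ((List.range (m + 1)).map (fun j => (2 : Int) ^ j)) ((j : Nat) : Int) 0
      = 2 ^ j := by
  rw [PySem.List.pyGetD_natCast]
  simp [List.getD_eq_getElem?_getD, hj]

-- A's second loop is the difference-of-two-power-sums.
theorem sumDiff_A_fold (S : List Int) (m k : Nat) (hk : k ≤ m) :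
    (PySem.List.pyRange 0 (k : Int)).foldl
      (fun ans i =>
        ans + (PySem.List.pyGetD S i 0 *
                 PySem.List.pyGetD ((List.range (m + 1)).map (fun j => (2 : Int) ^ j)) i 0
               - PySem.List.pyGetD S i 0 *
                 PySem.List.pyGetD ((List.range (m + 1)).map (fun j => (2 : Int) ^ j))
                   ((m : Int) - 1 - i) 0))
      0
    = ∑ i ∈ Finset.range k,
        (PySem.List.pyGetD S (i : Int) 0 * 2 ^ i
         - PySem.List.pyGetD S (i : Int) 0 * 2 ^ (m - 1 - i)) := by
  induction k with
  | zero => rw [PySem.List.pyRange_one_eq_nil (by norm_num)]; simp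
  | succ k ih =>
      have hk' : k ≤ m := Nat.le_of_succ_le hk
      rw [show ((k + 1 : Nat) : Int) = (k : Int) + 1 by push_cast; ring,
        PySem.List.pyRange_one_succ_right (by positivity), List.foldl_append, ih hk']
      simp only [List.foldl_cons, List.foldl_nil]
      rw [Finset.sum_range_succ, sumDiff_pow_get m k (by omega),
        show (m : Int) - 1 - (k : Int) = ((m - 1 - k : Nat) : Int) by omega,
        sumDiff_pow_get m (m - 1 - k) (by omega)]

-- B's loop: the running pair is (partial sum, 2^steps).
theorem sumDiff_B_fold (S : List Int) (n : Int) (k : Nat) :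
    (PySem.List.pyRange 0 (k : Int)).foldl
      (fun (st : Int × Int) i =>
        (st.1 + (PySem.List.pyGetD S i 0 - PySem.List.pyGetD S (n - 1 - i) 0) * st.2,
         st.2 * 2))
      (0, 1)
    = (∑ i ∈ Finset.range k,
         (PySem.List.pyGetD S (i : Int) 0 - PySem.List.pyGetD S (n - 1 - (i : Int)) 0) * 2 ^ i,
       2 ^ k) := by
  induction k with
  | zero => rw [PySem.List.pyRange_one_eq_nil (by norm_num)]; simp
  | succ k ih =>
      rw [show ((k + 1 : Nat) : Int) = (k : Int) + 1 by push_cast; ring,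
        PySem.List.pyRange_one_succ_right (by positivity), List.foldl_append, ih]
      simp only [List.foldl_cons, List.foldl_nil]
      rw [Finset.sum_range_succ, pow_succ]

-- The reflection identity behind B: Σ S[i]·2^(m-1-i) = Σ S[m-1-i]·2^i.
theorem sumDiff_reflect (S : List Int) (m : Nat) :
    ∑ i ∈ Finset.range m, PySem.List.pyGetD S (i : Int) 0 * 2 ^ (m - 1 - i)
    = ∑ i ∈ Finset.range m, PySem.List.pyGetD S (((m - 1 - i : Nat)) : Int) 0 * 2 ^ i := by
  rw [← Finset.sum_range_reflect (fun j => PySem.List.pyGetD S (j : Int) 0 * 2 ^ (m - 1 - j)) m]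
  apply Finset.sum_congr rfl
  intro i hi
  have hi' : i < m := Finset.mem_range.mp hi
  have : m - 1 - (m - 1 - i) = i := by omega
  rw [this]

-- ===== VERDICT (by name: the statement is the Claim_ definition above) =====
theorem sumDiff_spec : Claim_equal_sumDiff := by
  intro S n _hdom _hpre
  unfold Spec_sumDiff sumDiff sumDiff_alt
  by_cases hn : n ≤ 0
  · rw [PySem.List.pyRange_one_eq_nil hn]
    simp
  · have hn' : 0 ≤ n := by omega
    obtain ⟨m, rfl⟩ : ∃ m : Nat, n = (m : Int) := ⟨n.toNat, (Int.toNat_of_nonneg hn').symm⟩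
    rw [show ((m : Int) + 1).toNat = m + 1 by omega,
      show (m : Int) + 1 = ((m + 1 : Nat) : Int) by push_cast; ring,
      show ((m + 1 : Nat) : Int) = ((m : Nat) : Int) + 1 by omega]
    rw [sumDiff_build_aux m m (le_refl m), Nat.sub_self, List.replicate_zero, List.append_nil]
    rw [sumDiff_A_fold S m m (le_refl m), sumDiff_B_fold S ((m : Int)) m]
    rw [Finset.sum_sub_distrib, sumDiff_reflect S m, ← Finset.sum_sub_distrib]
    apply Finset.sum_congr rfl
    intro i hi
    have hi' : i < m := Finset.mem_range.mp hi
    rw [show (m : Int) - 1 - (i : Int) = ((m - 1 - i : Nat) : Int) by omega]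
    ring
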